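-- pv_equiv track=rewrite | github.com/Com4n/task8 | task8/mat.py | count_isolated_ones
-- ===== SOURCE A (Python) =====
-- def count_isolated_ones(matrix, rows, columns):
--     isolated_ones = 0
--     for r in range(rows):
--         for c in range(columns):
--             if matrix[r][c] == 1:
--                 if ((r == 0 or matrix[r-1][c] == 0) and
--                     (r == rows-1 or matrix[r+1][c] == 0) and
--                     (c == 0 or matrix[r][c-1] == 0) and
--                     (c == columns-1 or matrix[r][c+1] == 0)):
--                     isolated_ones += 1
--     return isolated_ones
-- ===== SOURCE B (Python) =====
-- def count_isolated_ones(matrix, rows, columns):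
--     nz = {}
--     for r in range(rows):
--         for c in range(columns):
--             v = matrix[r][c]
--             if v != 0:
--                 nz[(r, c)] = v
--     count = 0
--     for (r, c), v in nz.items():
--         if v == 1 and (r-1, c) not in nz and (r+1, c) not in nz and (r, c-1) not in nz and (r, c+1) not in nz:
--             count += 1
--     return count
-- ===== Notes on version B (the rewrite author's own statement) =====
-- stated objective: alternative
-- what changed: Replaces the boundary-checked direct neighbor indexing with a first pass that collects all nonzero cells into a dict keyed by coordinate and a second pass over that dict counting 1-valued entries whose four neighbor keys are absent (off-grid neighbors are naturally missing).
import Mathlib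
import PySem

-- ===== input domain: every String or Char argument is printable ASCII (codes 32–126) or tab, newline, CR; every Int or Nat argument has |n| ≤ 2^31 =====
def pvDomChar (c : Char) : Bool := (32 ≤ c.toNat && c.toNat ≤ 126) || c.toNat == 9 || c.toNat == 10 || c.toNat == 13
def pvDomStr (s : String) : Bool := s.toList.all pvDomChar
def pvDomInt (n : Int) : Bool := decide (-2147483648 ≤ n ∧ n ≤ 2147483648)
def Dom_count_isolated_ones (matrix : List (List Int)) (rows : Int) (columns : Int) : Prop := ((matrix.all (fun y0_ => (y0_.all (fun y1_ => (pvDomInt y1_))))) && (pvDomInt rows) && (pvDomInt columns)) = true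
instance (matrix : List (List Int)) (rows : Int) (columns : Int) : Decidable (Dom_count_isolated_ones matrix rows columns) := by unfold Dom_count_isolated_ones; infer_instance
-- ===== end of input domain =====

-- B replaces A's boundary-checked neighbor indexing with one pass collecting the nonzero cells into a
-- dict and a second pass over that dict testing the four neighbour keys (alternative, same cost).

-- ===== PORT A =====
-- matrix[r][c] as both programs access it; out-of-range (excluded by Pre_) yields 0
def pvCell (matrix : List (List Int)) (r c : Int) : Int :=
  (PySem.List.pyGet? ((PySem.List.pyGet? matrix r).getD []) c).getD 0

def count_isolated_ones (matrix : List (List Int)) (rows : Int) (columns : Int) : Int :=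
  (PySem.List.pyRange 0 rows 1).foldl (fun isolated_ones r =>
    (PySem.List.pyRange 0 columns 1).foldl (fun isolated_ones c =>
      if pvCell matrix r c = 1 then
        if (r = 0 ∨ pvCell matrix (r-1) c = 0) ∧ (r = rows - 1 ∨ pvCell matrix (r+1) c = 0) ∧
           (c = 0 ∨ pvCell matrix r (c-1) = 0) ∧ (c = columns - 1 ∨ pvCell matrix r (c+1) = 0) then
          isolated_ones + 1
        else isolated_ones
      else isolated_ones) isolated_ones) 0

-- ===== PORT B =====
def count_isolated_ones_alt (matrix : List (List Int)) (rows : Int) (columns : Int) : Int :=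
  let nz : PySem.Dict (Int × Int) Int :=
    (PySem.List.pyRange 0 rows 1).foldl (fun nz r =>
      (PySem.List.pyRange 0 columns 1).foldl (fun nz c =>
        let v := pvCell matrix r c
        if v ≠ 0 then nz.insert (r, c) v else nz) nz) PySem.Dict.empty
  nz.items.foldl (fun count rcv =>
    if rcv.2 = 1 ∧ nz.contains (rcv.1.1 - 1, rcv.1.2) = false ∧
       nz.contains (rcv.1.1 + 1, rcv.1.2) = false ∧ nz.contains (rcv.1.1, rcv.1.2 - 1) = false ∧
       nz.contains (rcv.1.1, rcv.1.2 + 1) = false then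
      count + 1
    else count) 0

-- ===== PRECONDITION & SPEC =====
-- Pre_ excludes exactly the inputs where Python A (and B) raises IndexError: when both loop bounds are
-- positive, every scanned cell matrix[r][c], r < rows, c < columns, must exist.
def Pre_count_isolated_ones (matrix : List (List Int)) (rows : Int) (columns : Int) : Prop :=
  0 < rows → 0 < columns →
    rows ≤ (matrix.length : Int) ∧ ∀ row ∈ matrix.take rows.toNat, columns ≤ (row.length : Int)
instance (matrix : List (List Int)) (rows : Int) (columns : Int) : Decidable (Pre_count_isolated_ones matrix rows columns) := by unfold Pre_count_isolated_ones; infer_instance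

def pvWitness_count_isolated_ones : List (List Int) × Int × Int := ([[1, 0], [0, 1]], 2, 2)

def Spec_count_isolated_ones (matrix : List (List Int)) (rows : Int) (columns : Int) (out : Int) : Prop := out = count_isolated_ones_alt matrix rows columns
instance (matrix : List (List Int)) (rows : Int) (columns : Int) (out : Int) : Decidable (Spec_count_isolated_ones matrix rows columns out) := by unfold Spec_count_isolated_ones; infer_instance

-- ===== CLAIM (what is proved, stated in full; the proofs are below) =====
def Claim_equal_count_isolated_ones : Prop := ∀ (matrix : List (List Int)) (rows : Int) (columns : Int), Dom_count_isolated_ones matrix rows columns → Pre_count_isolated_ones matrix rows columns → Spec_count_isolated_ones matrix rows columns (count_isolated_ones matrix rows columns)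

-- ===== LEMMAS AND PROOFS =====

-- the row-major list of scanned coordinates
def pvGrid (rows columns : Int) : List (Int × Int) :=
  (PySem.List.pyRange 0 rows 1).product (PySem.List.pyRange 0 columns 1)

def pvCondA (matrix : List (List Int)) (rows columns : Int) (p : Int × Int) : Bool :=
  decide (pvCell matrix p.1 p.2 = 1 ∧
  (p.1 = 0 ∨ pvCell matrix (p.1-1) p.2 = 0) ∧ (p.1 = rows - 1 ∨ pvCell matrix (p.1+1) p.2 = 0) ∧
  (p.2 = 0 ∨ pvCell matrix p.1 (p.2-1) = 0) ∧ (p.2 = columns - 1 ∨ pvCell matrix p.1 (p.2+1) = 0))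

lemma pvFoldl_product {γ : Type} (l₁ l₂ : List Int) (g : γ → Int × Int → γ) (init : γ) :
    (l₁.product l₂).foldl g init =
      l₁.foldl (fun acc a => l₂.foldl (fun acc b => g acc (a, b)) acc) init := by
  simp [List.product, List.foldl_flatMap, List.foldl_map]

lemma pvNodup_grid (rows columns : Int) : (pvGrid rows columns).Nodup :=
  List.Nodup.product (PySem.List.nodup_pyRange_one 0 rows) (PySem.List.nodup_pyRange_one 0 columns)

lemma pvMem_grid (rows columns : Int) (p : Int × Int) :
    p ∈ pvGrid rows columns ↔ (0 ≤ p.1 ∧ p.1 < rows) ∧ (0 ≤ p.2 ∧ p.2 < columns) := by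
  obtain ⟨a, b⟩ := p
  simp [pvGrid, List.pair_mem_product, PySem.List.mem_pyRange_one]

lemma pvA_eq_countP (matrix : List (List Int)) (rows columns : Int) :
    count_isolated_ones matrix rows columns =
      ((pvGrid rows columns).countP (pvCondA matrix rows columns) : Int) := by
  have h1 : count_isolated_ones matrix rows columns =
      (pvGrid rows columns).foldl (fun acc p =>
        if pvCell matrix p.1 p.2 = 1 then
          if (p.1 = 0 ∨ pvCell matrix (p.1-1) p.2 = 0) ∧ (p.1 = rows - 1 ∨ pvCell matrix (p.1+1) p.2 = 0) ∧
             (p.2 = 0 ∨ pvCell matrix p.1 (p.2-1) = 0) ∧ (p.2 = columns - 1 ∨ pvCell matrix p.1 (p.2+1) = 0) then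
            acc + 1
          else acc
        else acc) 0 := by
    rw [pvGrid, pvFoldl_product]
    rfl
  rw [h1]
  exact (PySem.List.foldl_congr_mem (pvGrid rows columns) _
      (fun acc p => if pvCondA matrix rows columns p then acc + 1 else acc) 0
      (by
        intro acc p _
        by_cases hc : pvCell matrix p.1 p.2 = 1 <;>
          by_cases hd : (p.1 = 0 ∨ pvCell matrix (p.1-1) p.2 = 0) ∧ (p.1 = rows - 1 ∨ pvCell matrix (p.1+1) p.2 = 0) ∧
             (p.2 = 0 ∨ pvCell matrix p.1 (p.2-1) = 0) ∧ (p.2 = columns - 1 ∨ pvCell matrix p.1 (p.2+1) = 0) <;>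
          simp [pvCondA, hc, hd])).trans
    (by rw [PySem.List.foldl_if_add_one, zero_add])

def pvL (matrix : List (List Int)) (rows columns : Int) : List (Int × Int) :=
  (pvGrid rows columns).filter (fun p => decide (pvCell matrix p.1 p.2 ≠ 0))

def pvNZ (matrix : List (List Int)) (rows columns : Int) : PySem.Dict (Int × Int) Int :=
  (PySem.List.pyRange 0 rows 1).foldl (fun nz r =>
    (PySem.List.pyRange 0 columns 1).foldl (fun nz c =>
      let v := pvCell matrix r c
      if v ≠ 0 then nz.insert (r, c) v else nz) nz) PySem.Dict.empty

lemma pvNZ_items (matrix : List (List Int)) (rows columns : Int) :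
    (pvNZ matrix rows columns).items =
      (pvL matrix rows columns).map (fun p => (p, pvCell matrix p.1 p.2)) := by
  have h1 : pvNZ matrix rows columns =
      (pvGrid rows columns).foldl (fun nz p =>
        if pvCell matrix p.1 p.2 ≠ 0 then nz.insert p (pvCell matrix p.1 p.2) else nz)
        PySem.Dict.empty := by
    rw [pvNZ, pvGrid, pvFoldl_product]
  rw [h1, PySem.List.foldl_ite_eq_foldl_filter]
  have h2 := PySem.Dict.items_foldl_insert_fresh (pvL matrix rows columns)
      (fun p => p) (fun p => pvCell matrix p.1 p.2) PySem.Dict.empty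
      (fun a _ => by simp)
      (by simpa using List.Nodup.filter _ (pvNodup_grid rows columns))
  simpa [pvL, show (PySem.Dict.empty : PySem.Dict (Int × Int) Int).items = [] from rfl] using h2

lemma pvNZ_contains (matrix : List (List Int)) (rows columns : Int) (q : Int × Int) :
    (pvNZ matrix rows columns).contains q =
      decide ((0 ≤ q.1 ∧ q.1 < rows) ∧ (0 ≤ q.2 ∧ q.2 < columns) ∧ pvCell matrix q.1 q.2 ≠ 0) := by
  have hk : (pvNZ matrix rows columns).keys = pvL matrix rows columns := by
    show ((pvNZ matrix rows columns).items).map Prod.fst = _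
    rw [pvNZ_items]
    simp [Function.comp_def]
  rw [PySem.Dict.contains_eq_decide_mem_keys, hk]
  have : q ∈ pvL matrix rows columns ↔
      (0 ≤ q.1 ∧ q.1 < rows) ∧ (0 ≤ q.2 ∧ q.2 < columns) ∧ pvCell matrix q.1 q.2 ≠ 0 := by
    rw [pvL, List.mem_filter]
    simp [pvMem_grid, and_assoc]
  simp [this]

lemma pvPointwise (matrix : List (List Int)) (rows columns : Int) (p : Int × Int)
    (hp : p ∈ pvGrid rows columns) :
    pvCondA matrix rows columns p = true ↔
      ((pvCell matrix p.1 p.2 = 1 ∧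
        ¬ ((0 ≤ p.1 - 1 ∧ p.1 - 1 < rows) ∧ (0 ≤ p.2 ∧ p.2 < columns) ∧ pvCell matrix (p.1-1) p.2 ≠ 0) ∧
        ¬ ((0 ≤ p.1 + 1 ∧ p.1 + 1 < rows) ∧ (0 ≤ p.2 ∧ p.2 < columns) ∧ pvCell matrix (p.1+1) p.2 ≠ 0) ∧
        ¬ ((0 ≤ p.1 ∧ p.1 < rows) ∧ (0 ≤ p.2 - 1 ∧ p.2 - 1 < columns) ∧ pvCell matrix p.1 (p.2-1) ≠ 0) ∧
        ¬ ((0 ≤ p.1 ∧ p.1 < rows) ∧ (0 ≤ p.2 + 1 ∧ p.2 + 1 < columns) ∧ pvCell matrix p.1 (p.2+1) ≠ 0)) ∧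
       pvCell matrix p.1 p.2 ≠ 0) := by
  obtain ⟨r, c⟩ := p
  rw [pvMem_grid] at hp
  simp only [pvCondA, decide_eq_true_eq]
  generalize pvCell matrix r c = v at *
  generalize pvCell matrix (r-1) c = vu at *
  generalize pvCell matrix (r+1) c = vd at *
  generalize pvCell matrix r (c-1) = vl at *
  generalize pvCell matrix r (c+1) = vr at *
  simp only at *
  omega

lemma pvB_eq_countP (matrix : List (List Int)) (rows columns : Int) :
    count_isolated_ones_alt matrix rows columns =
      ((pvGrid rows columns).countP (pvCondA matrix rows columns) : Int) := by
  have h0 : count_isolated_ones_alt matrix rows columns =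
      (pvNZ matrix rows columns).items.foldl (fun count rcv =>
        if rcv.2 = 1 ∧ (pvNZ matrix rows columns).contains (rcv.1.1 - 1, rcv.1.2) = false ∧
           (pvNZ matrix rows columns).contains (rcv.1.1 + 1, rcv.1.2) = false ∧
           (pvNZ matrix rows columns).contains (rcv.1.1, rcv.1.2 - 1) = false ∧
           (pvNZ matrix rows columns).contains (rcv.1.1, rcv.1.2 + 1) = false then
          count + 1 else count) 0 := rfl
  rw [h0, pvNZ_items, List.foldl_map, PySem.List.foldl_ite_add_one, zero_add]
  rw [pvL, List.countP_filter]
  congr 1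
  refine (List.countP_congr ?_).symm
  intro x hx
  rw [pvPointwise matrix rows columns x hx]
  simp only [Bool.and_eq_true, decide_eq_true_eq, pvNZ_contains, decide_eq_false_iff_not]

-- ===== VERDICT (by name: the statement is the Claim_ definition above) =====
theorem count_isolated_ones_spec : Claim_equal_count_isolated_ones := by
  intro matrix rows columns _ _
  unfold Spec_count_isolated_ones
  rw [pvA_eq_countP, pvB_eq_countP]
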